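-- pv_equiv track=rewrite | github.com/tjd1234/cmpt120fall2024 | lectures/lecture24/quiz.py | parity_split_1
-- ===== SOURCE A (Python) =====
-- def parity_split_1(lst_num):
--     """Returns a list of even numbers, and odd numbers, in a list.
--     Assumes lst is a list of 0 or more numbers.
--     It returns a list contain two lists:
--
--     - the first list is all the even numbers that appear in lst, sorted in
--       descending order (biggest to smallest)
--     - the second list is all the odd numbers that appear in lst, sorted in
--       descending order (biggest to smallest)
--
--     >>> parity_split_1([])
--     [[], []]
--     >>> parity_split_1([1,2,3,4,5])
--     [[4, 2], [5, 3, 1]]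
--     >>> parity_split_1([0, 3, 5, 6, 6, -4])
--     [[6, 6, 0, -4], [5, 3]]
--     """
--     odds = []
--     evens = []
--     for n in lst_num:
--         if n % 2 == 0:
--             evens.append(n)
--         else:
--             odds.append(n)
--     odds.sort()
--     odds.reverse()
--     evens.sort()
--     evens.reverse()
--     return [evens, odds]
-- ===== SOURCE B (Python) =====
-- def parity_split_1(lst_num):
--     """One global descending sort, then a single partition pass; each
--     filtered sublist is already in descending order."""
--     s = sorted(lst_num, reverse=True)
--     evens = []
--     odds = []
--     for n in s:
--         if n % 2 == 0:
--             evens.append(n)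
--         else:
--             odds.append(n)
--     return [evens, odds]
-- ===== Notes on version B (the rewrite author's own statement) =====
-- stated objective: alternative
-- what changed: A partitions first and then sorts each group twice (sort+reverse per group); B performs one global descending sort up front and then a single partition pass, with no per-group sorting.
import Mathlib
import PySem

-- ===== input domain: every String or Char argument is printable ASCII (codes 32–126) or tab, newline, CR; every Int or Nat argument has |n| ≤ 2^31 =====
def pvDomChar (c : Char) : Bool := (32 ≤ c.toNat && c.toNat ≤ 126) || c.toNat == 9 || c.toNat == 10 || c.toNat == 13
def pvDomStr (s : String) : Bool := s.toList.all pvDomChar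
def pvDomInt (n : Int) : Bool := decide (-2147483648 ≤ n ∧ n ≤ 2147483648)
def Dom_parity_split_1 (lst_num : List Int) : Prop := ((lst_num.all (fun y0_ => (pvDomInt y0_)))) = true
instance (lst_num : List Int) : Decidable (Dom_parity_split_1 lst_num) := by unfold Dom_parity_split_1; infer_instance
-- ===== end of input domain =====

-- B replaces A's partition-then-sort-each-group (two sort+reverse passes) by one
-- global descending sort followed by a single partition pass (alternative decomposition).


-- ===== PORT A =====
-- loop appending to odds/evens, then odds.sort(); odds.reverse(); evens.sort(); evens.reverse()
def parity_split_1 (lst_num : List Int) : List (List Int) :=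
  let st := lst_num.foldl
    (fun (st : List Int × List Int) n =>
      if PySem.Int.mod n 2 = 0 then (st.1, st.2 ++ [n]) else (st.1 ++ [n], st.2))
    ([], [])   -- (odds, evens)
  let odds := (PySem.List.sorted st.1 (fun x => x) false).reverse
  let evens := (PySem.List.sorted st.2 (fun x => x) false).reverse
  [evens, odds]

-- ===== PORT B =====
-- s = sorted(lst_num, reverse=True); one partition pass over s
def parity_split_1_alt (lst_num : List Int) : List (List Int) :=
  let s := PySem.List.sorted lst_num (fun x => x) true
  let st := s.foldl
    (fun (st : List Int × List Int) n =>
      if PySem.Int.mod n 2 = 0 then (st.1 ++ [n], st.2) else (st.1, st.2 ++ [n]))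
    ([], [])   -- (evens, odds)
  [st.1, st.2]

-- ===== PRECONDITION & SPEC =====
def Spec_parity_split_1 (lst_num : List Int) (out : List (List Int)) : Prop := out = parity_split_1_alt lst_num
instance (lst_num : List Int) (out : List (List Int)) : Decidable (Spec_parity_split_1 lst_num out) := by unfold Spec_parity_split_1; infer_instance

-- ===== CLAIM (what is proved, stated in full; the proofs are below) =====
def Claim_equal_parity_split_1 : Prop := ∀ (lst_num : List Int), Dom_parity_split_1 lst_num → Spec_parity_split_1 lst_num (parity_split_1 lst_num)

-- ===== LEMMAS AND PROOFS =====

-- A's accumulating pair-fold is (odds ++ filter ¬even, evens ++ filter even).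
theorem foldA (xs : List Int) (o e : List Int) :
    xs.foldl (fun (st : List Int × List Int) n =>
      if PySem.Int.mod n 2 = 0 then (st.1, st.2 ++ [n]) else (st.1 ++ [n], st.2)) (o, e)
    = (o ++ xs.filter (fun n => !decide (PySem.Int.mod n 2 = 0)),
       e ++ xs.filter (fun n => decide (PySem.Int.mod n 2 = 0))) := by
  induction xs generalizing o e with
  | nil => simp
  | cons x xs ih =>
    by_cases h : PySem.Int.mod x 2 = 0
    · rw [List.foldl_cons, if_pos h, ih]; simp [List.filter_cons, (PySem.Int.mod_eq_zero_iff_dvd x 2).mp h]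
    · rw [List.foldl_cons, if_neg h, ih]
      rw [PySem.Int.mod_eq_emod_of_pos (by norm_num)] at h
      simp [List.filter_cons]
      omega

-- B's accumulating pair-fold is (evens ++ filter even, odds ++ filter ¬even).
theorem foldB (xs : List Int) (e o : List Int) :
    xs.foldl (fun (st : List Int × List Int) n =>
      if PySem.Int.mod n 2 = 0 then (st.1 ++ [n], st.2) else (st.1, st.2 ++ [n])) (e, o)
    = (e ++ xs.filter (fun n => decide (PySem.Int.mod n 2 = 0)),
       o ++ xs.filter (fun n => !decide (PySem.Int.mod n 2 = 0))) := by
  induction xs generalizing e o with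
  | nil => simp
  | cons x xs ih =>
    by_cases h : PySem.Int.mod x 2 = 0
    · rw [List.foldl_cons, if_pos h, ih]; simp [List.filter_cons, (PySem.Int.mod_eq_zero_iff_dvd x 2).mp h]
    · rw [List.foldl_cons, if_neg h, ih]
      rw [PySem.Int.mod_eq_emod_of_pos (by norm_num)] at h
      simp [List.filter_cons]
      omega

-- filtering a descending sort = reversing the ascending sort of the filtered list
theorem filter_sorted_rev (l : List Int) (p : Int → Bool) :
    (PySem.List.sorted l (fun x => x) true).filter p
      = (PySem.List.sorted (l.filter p) (fun x => x) false).reverse := by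
  apply PySem.List.eq_of_perm_of_pairwise_le_of_injective (fun x : Int => -x)
    (fun a b h => by simpa using neg_injective h)
  · exact ((PySem.List.sorted_perm l (fun x => x) true).filter p).trans
      ((PySem.List.sorted_perm (l.filter p) (fun x => x) false).symm.trans
        (List.reverse_perm _).symm)
  · have := PySem.List.sorted_pairwise_rev (xs := l) (key := fun x => x)
    exact (this.sublist List.filter_sublist).imp (by intro a b h; simpa using h)
  · rw [List.pairwise_reverse]
    exact (PySem.List.sorted_pairwise (xs := l.filter p) (key := fun x => x)).imp
      (by intro a b h; simpa using h)

-- ===== VERDICT (by name: the statement is the Claim_ definition above) =====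
theorem parity_split_1_spec : Claim_equal_parity_split_1 := by
  intro lst _
  unfold Spec_parity_split_1 parity_split_1 parity_split_1_alt
  simp only [foldA, foldB, List.nil_append]
  rw [filter_sorted_rev, filter_sorted_rev]
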